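-- pv_equiv track=rewrite | github.com/ryangerardwilson/gvim | export_html.py | _slugify_heading
-- ===== SOURCE A (Python) =====
-- def _slugify_heading(text: str) -> str:
--     slug = []
--     prev_dash = False
--     for char in text.strip().lower():
--         if char.isalnum():
--             slug.append(char)
--             prev_dash = False
--         elif not prev_dash:
--             slug.append("-")
--             prev_dash = True
--     slug_text = "".join(slug).strip("-")
--     return slug_text or "section"
-- ===== SOURCE B (Python) =====
-- def _slugify_heading(text: str) -> str:
--     mapped = "".join(c if c.isalnum() else " " for c in text.strip().lower())
--     return "-".join(mapped.split()) or "section"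
-- ===== Notes on version B (the rewrite author's own statement) =====
-- stated objective: simpler
-- what changed: A's stateful loop (a prev_dash flag collapsing separator runs while appending, then stripping boundary dashes) is replaced by a stateless pass mapping each character to itself if alphanumeric else a space, then splitting on whitespace and joining the pieces with single dashes.
import Mathlib
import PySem

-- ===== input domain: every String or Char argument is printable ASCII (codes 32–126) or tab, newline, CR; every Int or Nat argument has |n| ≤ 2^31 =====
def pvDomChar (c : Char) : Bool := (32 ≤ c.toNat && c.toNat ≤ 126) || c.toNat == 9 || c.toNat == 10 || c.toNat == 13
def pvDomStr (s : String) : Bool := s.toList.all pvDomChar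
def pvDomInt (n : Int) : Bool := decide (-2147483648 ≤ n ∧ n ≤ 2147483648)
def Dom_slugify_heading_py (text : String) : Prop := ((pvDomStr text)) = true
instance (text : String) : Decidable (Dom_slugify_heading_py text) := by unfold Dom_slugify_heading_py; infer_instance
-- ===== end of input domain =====

-- B replaces A's stateful prev_dash run-collapsing loop by a map-to-space pass plus str.split()/"-".join() (simpler decomposition, same result).

-- ===== PORT A =====
-- literal port: slug/prev_dash loop over text.strip().lower(), then "".join(slug).strip("-"), then `or "section"`
def slugify_heading_py (text : String) : String :=
  let st : List Char × Bool :=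
    (PySem.Chars.lower (PySem.Chars.strip text.toList)).foldl
      (fun (s : List Char × Bool) (char : Char) =>
        if PySem.Chars.isalnum char then (s.1 ++ [char], false)
        else if s.2 = false then (s.1 ++ ['-'], true)
        else s) ([], false)
  let slug_text := PySem.Chars.stripChars st.1 ['-']
  if slug_text = [] then "section" else String.ofList slug_text

-- ===== PORT B =====
-- literal port of Source B: map each char of text.strip().lower() to itself if alnum else ' ', then "-".join(mapped.split()), `or "section"`
def slugify_heading_py_alt (text : String) : String :=
  let mapped : List Char :=
    (PySem.Chars.lower (PySem.Chars.strip text.toList)).map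
      (fun c => if PySem.Chars.isalnum c then c else ' ')
  let joined := PySem.Chars.join ['-'] (PySem.Chars.split₀ mapped)
  if joined = [] then "section" else String.ofList joined

-- ===== PRECONDITION & SPEC =====
def Spec_slugify_heading_py (text : String) (out : String) : Prop := out = slugify_heading_py_alt text
instance (text : String) (out : String) : Decidable (Spec_slugify_heading_py text out) := by unfold Spec_slugify_heading_py; infer_instance

-- ===== CLAIM (what is proved, stated in full; the proofs are below) =====
def Claim_equal_slugify_heading_py : Prop := ∀ (text : String), Dom_slugify_heading_py text → Spec_slugify_heading_py text (slugify_heading_py text)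

-- ===== LEMMAS AND PROOFS =====

def pvF (c : Char) : Bool := PySem.Chars.isalnum c
def pvG (c : Char) : Char := if pvF c then c else ' '
def pvWords : List Char → List (List Char)
  | [] => []
  | c :: r =>
    if pvF c then (c :: r.takeWhile pvF) :: pvWords (r.dropWhile pvF)
    else pvWords r
termination_by l => l.length
decreasing_by
  · simpa using Nat.lt_succ_of_le (r.length_dropWhile_le pvF)
  · simp
def pvClose (cur : List Char) (es : List Char) : List (List Char) :=
  match es with
  | [] => if cur.isEmpty then [] else [cur.reverse]
  | c :: r =>
    if cur.isEmpty then pvWords (c :: r)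
    else if pvF c then (cur.reverse ++ c :: r.takeWhile pvF) :: pvWords (r.dropWhile pvF)
    else cur.reverse :: pvWords (c :: r)
lemma pvF_not_space (c : Char) (h : pvF c = true) : PySem.Chars.isspace c = false := by
  apply Bool.eq_false_iff.mpr
  intro hs
  simp only [pvF, PySem.Chars.isalnum, PySem.Chars.isalpha, PySem.Chars.isupper,
    PySem.Chars.islower, PySem.Chars.isdigit, PySem.Chars.isspace, Char.le_def,
    UInt32.le_iff_toNat_le, Bool.or_eq_true, Bool.and_eq_true, decide_eq_true_eq,
    show 'A'.val.toNat = 65 from rfl, show 'Z'.val.toNat = 90 from rfl,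
    show 'a'.val.toNat = 97 from rfl, show 'z'.val.toNat = 122 from rfl,
    show '0'.val.toNat = 48 from rfl, show '9'.val.toNat = 57 from rfl, Char.toNat] at h hs
  omega
lemma pvClose_nil (es : List Char) : pvClose [] es = pvWords es := by
  cases es <;> simp [pvClose, pvWords]
lemma pvClose_shift (c : Char) (cur r : List Char) (hf : pvF c = true) :
    pvClose cur (c :: r) = pvClose (c :: cur) r := by
  cases cur with
  | nil =>
    cases r with
    | nil => simp [pvClose, pvWords, hf]
    | cons d t =>
      by_cases hd : pvF d = true
      · simp [pvClose, pvWords, hf, hd]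
      · simp [pvClose, pvWords, hf, hd]
  | cons x xs =>
    cases r with
    | nil => simp [pvClose, pvWords, hf]
    | cons d t =>
      by_cases hd : pvF d = true
      · simp [pvClose, hf, hd]
      · simp [pvClose, hf, hd]
lemma pvGo (es cur acc) :
    PySem.Chars.split₀.go (es.map pvG) cur acc = acc.reverse ++ pvClose cur es := by
  induction es generalizing cur acc with
  | nil =>
    cases cur with
    | nil => simp [PySem.Chars.split₀.go, pvClose]
    | cons x xs => simp [PySem.Chars.split₀.go, pvClose]
  | cons c r ih =>
    by_cases hf : pvF c = true
    · have hgc : pvG c = c := by simp [pvG, hf]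
      have hsp : PySem.Chars.isspace (pvG c) = false := by rw [hgc]; exact pvF_not_space c hf
      have hsp' : PySem.Chars.isspace c = false := pvF_not_space c hf
      simp only [List.map_cons, PySem.Chars.split₀.go, hgc, hsp', Bool.false_eq_true, if_false]
      rw [ih, pvClose_shift c cur r hf]
    · have hgc : pvG c = ' ' := by simp [pvG, hf]
      have hsp : PySem.Chars.isspace (pvG c) = true := by rw [hgc]; decide
      simp only [List.map_cons, PySem.Chars.split₀.go, hsp, if_true]
      have hw : pvWords (c :: r) = pvWords r := by simp [pvWords, hf]
      cases cur with
      | nil =>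
        simp only [List.isEmpty_nil, if_true, ih, pvClose_nil]
        show acc.reverse ++ pvWords r = acc.reverse ++ pvClose [] (c :: r)
        simp [pvClose, hw]
      | cons x xs =>
        simp only [List.isEmpty_cons, ih, pvClose_nil]
        show (((x :: xs).reverse :: acc).reverse ++ pvWords r) = acc.reverse ++ pvClose (x :: xs) (c :: r)
        simp [pvClose, hf, hw]
def pvDelta : Bool → List Char → List Char
  | _, [] => []
  | p, c :: r =>
    if pvF c then c :: pvDelta false r
    else if p then pvDelta true r
    else '-' :: pvDelta true r
def pvLead (es : List Char) : List Char :=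
  match es with
  | [] => []
  | c :: _ => if pvF c then [] else ['-']
def pvTrail (es : List Char) : Bool := es.any pvF && !pvF (es.getLastD 'a')

lemma pvFoldl (es : List Char) (a : List Char) (p : Bool) :
    (es.foldl (fun (s : List Char × Bool) (char : Char) =>
        if PySem.Chars.isalnum char then (s.1 ++ [char], false)
        else if s.2 = false then (s.1 ++ ['-'], true)
        else s) (a, p)).1 = a ++ pvDelta p es := by
  induction es generalizing a p with
  | nil => simp [pvDelta]
  | cons c r ih =>
    by_cases hf : pvF c = true
    · have h1 : PySem.Chars.isalnum c = true := hf
      simp only [List.foldl_cons, h1, if_true, ih, pvDelta, hf]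
      simp
    · have h1 : PySem.Chars.isalnum c = false := by simpa using hf
      cases p with
      | false =>
        simp only [List.foldl_cons, h1, Bool.false_eq_true, if_false, ih]
        simp [pvDelta, hf]
      | true =>
        simp only [List.foldl_cons, h1, Bool.false_eq_true, if_false,
          if_neg (by simp : ¬(true = false)), ih]
        simp [pvDelta, hf]

lemma pvWords_sound (es : List Char) :
    ∀ w ∈ pvWords es, w ≠ [] ∧ ∀ c ∈ w, pvF c = true := by
  induction es using pvWords.induct with
  | case1 => simp [pvWords]
  | case2 c r hf ih =>
    intro w hw
    rw [pvWords, if_pos hf] at hw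
    rcases List.mem_cons.mp hw with h | h
    · subst h
      refine ⟨by simp, ?_⟩
      intro x hx
      rcases List.mem_cons.mp hx with h | h
      · subst h; exact hf
      · exact List.mem_takeWhile_imp h
    · exact ih w h
  | case3 c r hf ih =>
    rw [pvWords, if_neg hf]
    exact ih

lemma pvWords_nil_iff (es : List Char) : pvWords es = [] ↔ ∀ c ∈ es, pvF c = false := by
  induction es using pvWords.induct with
  | case1 => simp [pvWords]
  | case2 c r hf ih =>
    rw [pvWords, if_pos hf]
    simp only [List.cons_ne_nil, false_iff]
    intro h
    have := h c (by simp)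
    rw [hf] at this; exact Bool.true_eq_false.mp this
  | case3 c r hf ih =>
    rw [pvWords, if_neg hf]
    rw [ih]
    constructor
    · intro h x hx
      rcases List.mem_cons.mp hx with h' | h'
      · subst h'; exact Bool.not_eq_true _ |>.mp hf
      · exact h x h'
    · intro h x hx; exact h x (List.mem_cons_of_mem c hx)

lemma pvDelta_run (w rest : List Char) (h : ∀ c ∈ w, pvF c = true) :
    pvDelta false (w ++ rest) = w ++ pvDelta false rest := by
  induction w with
  | nil => simp
  | cons c t ih =>
    have hc : pvF c = true := h c (by simp)
    simp only [List.cons_append, pvDelta, hc, if_true]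
    rw [ih (fun x hx => h x (List.mem_cons_of_mem c hx))]

lemma pvJoin_nil : PySem.Chars.join ['-'] [] = [] := by
  simp [PySem.Chars.join, List.intercalate]
lemma pvJoin_singleton (a : List Char) : PySem.Chars.join ['-'] [a] = a := by
  simp [PySem.Chars.join, List.intercalate]
lemma pvJoin_cons_cons (a b : List Char) (l : List (List Char)) :
    PySem.Chars.join ['-'] (a :: b :: l) = a ++ '-' :: PySem.Chars.join ['-'] (b :: l) := by
  simp [PySem.Chars.join, List.intercalate, List.intersperse]
lemma pvGetLastD_default (l : List Char) (d e : Char) (h : l ≠ []) :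
    l.getLastD d = l.getLastD e := by
  cases l with
  | nil => simp at h
  | cons x xs => rw [List.getLastD_cons, List.getLastD_cons]
lemma pvGetLastD_mem (l : List Char) (d : Char) (h : l ≠ []) : l.getLastD d ∈ l := by
  induction l generalizing d with
  | nil => simp at h
  | cons x xs ih =>
    cases xs with
    | nil => simp
    | cons y ys =>
      rw [List.getLastD_cons]
      exact List.mem_cons_of_mem x (ih x (by simp))
lemma pvGetLastD_append (l₁ l₂ : List Char) (d : Char) (h : l₂ ≠ []) :
    (l₁ ++ l₂).getLastD d = l₂.getLastD d := by
  induction l₁ generalizing d with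
  | nil => rfl
  | cons x xs ih =>
    cases l₂ with
    | nil => simp at h
    | cons y ys =>
      rw [List.cons_append, List.getLastD_cons, ih x]
      exact pvGetLastD_default _ _ _ (by simp)
lemma pvDropWhile_head (p : Char → Bool) (r : List Char) (d : Char) (t : List Char)
    (h : r.dropWhile p = d :: t) : p d = false := by
  induction r with
  | nil => simp at h
  | cons x xs ih =>
    rw [List.dropWhile_cons] at h
    by_cases hx : p x = true
    · rw [if_pos hx] at h; exact ih h
    · rw [if_neg hx] at h; cases h; simpa using hx

lemma pvDelta_true (es : List Char) :
    pvDelta true es =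
      PySem.Chars.join ['-'] (pvWords es) ++ (if pvTrail es then ['-'] else []) := by
  induction es using pvWords.induct with
  | case1 => simp [pvDelta, pvWords, pvTrail]
  | case2 c r hf ih =>
    have hwf : ∀ x ∈ r.takeWhile pvF, pvF x = true := fun x hx => List.mem_takeWhile_imp hx
    have hr : r.takeWhile pvF ++ r.dropWhile pvF = r := List.takeWhile_append_dropWhile
    rw [pvWords, if_pos hf]
    have hL : pvDelta true (c :: r) = c :: (r.takeWhile pvF ++ pvDelta false (r.dropWhile pvF)) := by
      rw [pvDelta, if_pos hf, ← pvDelta_run _ _ hwf, hr]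
    cases hrest : r.dropWhile pvF with
    | nil =>
      rw [hrest] at hL ih
      have hrw : r.takeWhile pvF = r := by
        have := hr; rw [hrest, List.append_nil] at this; exact this
      have hall : ∀ x ∈ c :: r, pvF x = true := by
        intro x hx
        rcases List.mem_cons.mp hx with h | h
        · subst h; exact hf
        · exact hwf x (by rw [hrw]; exact h)
      have htr : pvTrail (c :: r) = false := by
        have hm : (c :: r).getLastD 'a' ∈ c :: r := pvGetLastD_mem _ _ (by simp)
        have hgl : pvF ((c :: r).getLastD 'a') = true := hall _ hm
        simp only [pvTrail]
        rw [hgl]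
        simp
      rw [hL, hrw, htr]
      simp [pvWords, pvDelta]
    | cons d t =>
      have hd : pvF d = false := pvDropWhile_head pvF r d t hrest
      rw [hrest] at hL ih
      have h5a : pvDelta false (d :: t) = '-' :: pvDelta true t := by simp [pvDelta, hd]
      have h5b : pvDelta true (d :: t) = pvDelta true t := by simp [pvDelta, hd]
      rw [hL, h5a, ← h5b, ih]
      have hrne : r ≠ [] := by
        intro h; rw [h] at hrest; simp at hrest
      have hlast : (c :: r).getLastD 'a' = (d :: t).getLastD 'a' := by
        have : (c :: r) = (c :: r.takeWhile pvF) ++ (d :: t) := by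
          rw [← hrest]; simp [hr]
        rw [this, pvGetLastD_append _ _ _ (by simp)]
      by_cases hnil : pvWords (d :: t) = []
      · have hallrest : ∀ x ∈ d :: t, pvF x = false := (pvWords_nil_iff _).mp hnil
        have htr : pvTrail (c :: r) = true := by
          have hm : (d :: t).getLastD 'a' ∈ d :: t := pvGetLastD_mem _ _ (by simp)
          have hgl : pvF ((c :: r).getLastD 'a') = false := by
            rw [hlast]; exact hallrest _ hm
          simp only [pvTrail]
          rw [hgl]
          simp [hf]
        have htr2 : pvTrail (d :: t) = false := by
          have : (d :: t).any pvF = false := by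
            rw [List.any_eq_false]; intro x hx; simp [hallrest x hx]
          simp [pvTrail, this]
        rw [hnil, htr, htr2, pvJoin_nil, pvJoin_singleton]
        simp
      · obtain ⟨w', ws', hw⟩ := List.exists_cons_of_ne_nil hnil
        have hanyrest : (d :: t).any pvF = true := by
          by_contra h
          rw [Bool.not_eq_true, List.any_eq_false] at h
          exact hnil ((pvWords_nil_iff _).mpr (fun x hx => by simpa using h x hx))
        have htr : pvTrail (c :: r) = pvTrail (d :: t) := by
          have hany : (c :: r).any pvF = true := by simp [hf]
          simp only [pvTrail, hlast, hanyrest, hany, Bool.true_and]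
        rw [hw, pvJoin_cons_cons, htr, ← hw]
        simp
  | case3 c r hf ih =>
    have h1 : pvDelta true (c :: r) = pvDelta true r := by
      rw [pvDelta, if_neg hf]; simp
    have h2 : pvWords (c :: r) = pvWords r := by rw [pvWords, if_neg hf]
    cases r with
    | nil => simp [h2, pvDelta, pvTrail, pvWords, hf]
    | cons y ys =>
      have htr : pvTrail (c :: y :: ys) = pvTrail (y :: ys) := by
        simp only [pvTrail, List.any_cons]
        rw [Bool.not_eq_true _ |>.mp hf]
        simp only [Bool.false_or, List.getLastD_cons]
      rw [h1, h2, htr, ih]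

lemma pvDelta_false (es : List Char) :
    pvDelta false es = pvLead es ++ pvDelta true es := by
  cases es with
  | nil => simp [pvDelta, pvLead]
  | cons c r =>
    by_cases hf : pvF c = true
    · simp [pvDelta, pvLead, hf]
    · simp [pvDelta, pvLead, hf]

lemma pvJoin_last (ws : List (List Char)) (w : List Char)
    (h : ∀ v ∈ w :: ws, v ≠ [] ∧ ∀ c ∈ v, pvF c = true) :
    ∃ c m, (PySem.Chars.join ['-'] (w :: ws)).reverse = c :: m ∧ pvF c = true := by
  induction ws generalizing w with
  | nil =>
    rw [pvJoin_singleton]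
    have hne := (h w (by simp)).1
    obtain ⟨c, m, hcm⟩ :=
      List.exists_cons_of_ne_nil (fun h' => hne (List.reverse_eq_nil_iff.mp h'))
    have hcmem : c ∈ w := by
      rw [← List.mem_reverse, hcm]; simp
    exact ⟨c, m, hcm, (h w (by simp)).2 c hcmem⟩
  | cons v vs ih =>
    rw [pvJoin_cons_cons]
    obtain ⟨c, m, hcm, hc⟩ := ih v (fun u hu => h u (by simp [List.mem_cons.mp hu]))
    refine ⟨c, m ++ '-' :: w.reverse, ?_, hc⟩
    rw [List.reverse_append, List.reverse_cons]
    rw [hcm]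
    simp

lemma pvContains_false (c : Char) (h : pvF c = true) : (['-'].contains c) = false := by
  by_contra hc
  rw [Bool.not_eq_false] at hc
  have : c ∈ ['-'] := by simpa using hc
  simp at this
  subst this
  exact absurd h (by decide)

lemma pvStrip (es : List Char) :
    PySem.Chars.stripChars (pvDelta false es) ['-'] = PySem.Chars.join ['-'] (pvWords es) := by
  have hlead : pvLead es = [] ∨ pvLead es = ['-'] := by
    cases es with
    | nil => exact Or.inl rfl
    | cons c r =>
      by_cases h : pvF c = true
      · exact Or.inl (by simp [pvLead, h])
      · exact Or.inr (by simp [pvLead, h])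
  rw [pvDelta_false, pvDelta_true]
  by_cases hnil : pvWords es = []
  · have htr : pvTrail es = false := by
      have hany : es.any pvF = false := by
        rw [List.any_eq_false]
        intro x hx
        simp [(pvWords_nil_iff es).mp hnil x hx]
      simp [pvTrail, hany]
    rw [hnil, htr, pvJoin_nil]
    rcases hlead with h | h <;> rw [h] <;> decide
  · obtain ⟨w, ws, hw⟩ := List.exists_cons_of_ne_nil hnil
    have hsound : ∀ v ∈ w :: ws, v ≠ [] ∧ ∀ c ∈ v, pvF c = true := by
      rw [← hw]; exact pvWords_sound es
    obtain ⟨cl, m, hrev, hcl⟩ := pvJoin_last ws w hsound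
    obtain ⟨cw, w', hw'⟩ := List.exists_cons_of_ne_nil (hsound w (by simp)).1
    have hcw : pvF cw = true := (hsound w (by simp)).2 cw (by simp [hw'])
    have htail : ∃ tail, PySem.Chars.join ['-'] (w :: ws) = cw :: tail := by
      cases ws with
      | nil => exact ⟨w', by rw [pvJoin_singleton, hw']⟩
      | cons v vs =>
        exact ⟨w' ++ '-' :: PySem.Chars.join ['-'] (v :: vs),
          by rw [pvJoin_cons_cons, hw']; simp⟩
    obtain ⟨tail, htail⟩ := htail
    rw [hw]
    have hdJ : ∀ x : List Char,
        List.dropWhile (fun c => (['-'].contains c)) (PySem.Chars.join ['-'] (w :: ws) ++ x)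
          = PySem.Chars.join ['-'] (w :: ws) ++ x := by
      intro x
      rw [htail, List.cons_append, List.dropWhile_cons, pvContains_false cw hcw]
      simp
    have hdrev :
        List.dropWhile (fun c => (['-'].contains c)) (PySem.Chars.join ['-'] (w :: ws)).reverse
          = (PySem.Chars.join ['-'] (w :: ws)).reverse := by
      rw [hrev, List.dropWhile_cons, pvContains_false cl hcl]
      simp
    have hdJ0 : List.dropWhile (fun c => (['-'].contains c)) (PySem.Chars.join ['-'] (w :: ws))
        = PySem.Chars.join ['-'] (w :: ws) := by
      have := hdJ []
      simpa using this
    have hpd : ((['-'] : List Char).contains '-') = true := by decide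
    simp only [PySem.Chars.stripChars]
    rcases hlead with h | h <;> rw [h] <;> cases htr : pvTrail es
    · simp only [Bool.false_eq_true, if_false, List.nil_append, List.append_nil]
      rw [hdJ0, hdrev, List.reverse_reverse]
    · simp only [if_true, List.nil_append]
      rw [hdJ ['-'], List.reverse_append]
      simp only [List.reverse_cons, List.reverse_nil, List.nil_append, List.singleton_append]
      rw [List.dropWhile_cons, hpd]
      simp only [if_true]
      rw [hdrev, List.reverse_reverse]
    · simp only [Bool.false_eq_true, if_false, List.append_nil, List.singleton_append]
      rw [List.dropWhile_cons, hpd]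
      simp only [if_true]
      rw [hdJ0, hdrev, List.reverse_reverse]
    · simp only [if_true, List.singleton_append]
      rw [List.dropWhile_cons, hpd]
      simp only [if_true]
      rw [hdJ ['-'], List.reverse_append]
      simp only [List.reverse_cons, List.reverse_nil, List.nil_append, List.singleton_append]
      rw [List.dropWhile_cons, hpd]
      simp only [if_true]
      rw [hdrev, List.reverse_reverse]

lemma pvSplit (es : List Char) : PySem.Chars.split₀ (es.map pvG) = pvWords es := by
  have h0 : PySem.Chars.split₀ (es.map pvG) = PySem.Chars.split₀.go (es.map pvG) [] [] := rfl
  rw [h0, pvGo, pvClose_nil]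
  rfl

-- ===== VERDICT (by name: the statement is the Claim_ definition above) =====
theorem slugify_heading_py_spec : Claim_equal_slugify_heading_py := by
  intro text _
  unfold Spec_slugify_heading_py slugify_heading_py slugify_heading_py_alt
  dsimp only
  rw [show (fun c => if PySem.Chars.isalnum c then c else ' ') = pvG from rfl]
  rw [pvFoldl (PySem.Chars.lower (PySem.Chars.strip text.toList)) [] false]
  rw [List.nil_append, pvStrip, pvSplit]
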